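-- pv_equiv track=rewrite | github.com/google/orbax | model/orbax/experimental/model/tf2obm/tf_concrete_functions_to_obm.py | unzip2
-- ===== SOURCE A (Python) =====
-- from typing import Any, Callable, Dict, Iterable, Mapping, Sequence, Tuple, TypeVar
--
-- T1 = TypeVar('T1')
--
-- T2 = TypeVar('T2')
--
-- def unzip2(
--     xys: Iterable[tuple[T1, T2]],
-- ) -> tuple[tuple[T1, ...], tuple[T2, ...]]:
--   """Unzip sequence of length-2 tuples into two tuples."""
--   xs: list[T1] = []
--   ys: list[T2] = []
--   for x, y in xys:
--     xs.append(x)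
--     ys.append(y)
--   return tuple(xs), tuple(ys)
-- ===== SOURCE B (Python) =====
-- def unzip2(xys):
--   """Unzip sequence of length-2 tuples into two tuples."""
--   items = list(xys)
--   if not items:
--     return (), ()
--   xs, ys = zip(*items)
--   return xs, ys
-- ===== Notes on version B (the rewrite author's own statement) =====
-- stated objective: idiomatic
-- what changed: B materializes the iterable once and computes the transpose with zip(*items), with an early return for empty input, instead of A's manual two-accumulator append loop.
import Mathlib
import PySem

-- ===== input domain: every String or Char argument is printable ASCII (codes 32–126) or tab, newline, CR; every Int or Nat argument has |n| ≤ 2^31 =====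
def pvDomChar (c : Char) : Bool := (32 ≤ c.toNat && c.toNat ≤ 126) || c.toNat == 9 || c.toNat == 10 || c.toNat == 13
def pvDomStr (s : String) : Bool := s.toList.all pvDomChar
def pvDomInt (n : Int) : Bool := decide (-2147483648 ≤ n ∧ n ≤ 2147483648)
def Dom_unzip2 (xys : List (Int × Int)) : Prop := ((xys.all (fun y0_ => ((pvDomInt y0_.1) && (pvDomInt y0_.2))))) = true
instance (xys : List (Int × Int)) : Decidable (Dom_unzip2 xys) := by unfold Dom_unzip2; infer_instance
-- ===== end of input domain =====

-- B replaces A's two-accumulator append loop by the zip(*items) transpose (with the empty case returning ([], [])); same O(n) cost, more idiomatic.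

-- ===== PORT A =====
-- A: xs, ys accumulators, one append for each pair, fold over the input.
def unzip2 (xys : List (Int × Int)) : List Int × List Int :=
  let p := xys.foldl (fun (acc : List Int × List Int) xy =>
    (acc.1 ++ [xy.1], acc.2 ++ [xy.2])) ([], [])
  (p.1, p.2)

-- ===== PORT B =====
-- B: zip(*items) = the transpose: the list of first components and the list of second components.
def unzip2_alt (xys : List (Int × Int)) : List Int × List Int :=
  if xys = [] then ([], [])
  else (xys.map Prod.fst, xys.map Prod.snd)

-- ===== PRECONDITION & SPEC =====
def Spec_unzip2 (xys : List (Int × Int)) (out : List Int × List Int) : Prop := out = unzip2_alt xys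
instance (xys : List (Int × Int)) (out : List Int × List Int) : Decidable (Spec_unzip2 xys out) := by unfold Spec_unzip2; infer_instance

-- ===== CLAIM (what is proved, stated in full; the proofs are below) =====
def Claim_equal_unzip2 : Prop := ∀ (xys : List (Int × Int)), Dom_unzip2 xys → Spec_unzip2 xys (unzip2 xys)

-- ===== LEMMAS AND PROOFS =====
theorem unzip2_foldl (xys : List (Int × Int)) (a b : List Int) :
    xys.foldl (fun (acc : List Int × List Int) xy =>
      (acc.1 ++ [xy.1], acc.2 ++ [xy.2])) (a, b)
      = (a ++ xys.map Prod.fst, b ++ xys.map Prod.snd) := by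
  induction xys generalizing a b with
  | nil => simp
  | cons h t ih => simp [List.foldl, ih]

-- ===== VERDICT (by name: the statement is the Claim_ definition above) =====
theorem unzip2_spec : Claim_equal_unzip2 := by
  intro xys _
  unfold Spec_unzip2 unzip2 unzip2_alt
  cases xys with
  | nil => simp
  | cons h t => simp [unzip2_foldl]
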